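-- pv_equiv track=rewrite | github.com/beijixiaohu/OJBetter | .github/scripts/update-announce.py | parse_markdown
-- ===== SOURCE A (Python) =====
-- from collections import OrderedDict
--
-- def parse_markdown(md_content):
--     versions = OrderedDict()
--     current_version = None
--     for line in md_content.split("\n"):
--         if line.startswith("## "):
--             if len(versions) < 3:
--                 current_version = line.strip("# ").strip()
--                 versions[current_version] = ""
--             else:
--                 break
--         elif current_version:
--             versions[current_version] += "\n\n" + line.strip()
--     return versions
-- ===== SOURCE B (Python) =====
-- from collections import OrderedDict
--
--
-- def _segments(lines):
--     # Carve the line list into (name, body-lines) groups at section headers;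
--     # text before the first header is dropped.
--     segs = []
--     i, n = 0, len(lines)
--     while i < n:
--         head = lines[i]
--         i += 1
--         if head.startswith("## "):
--             j = i
--             while j < n and not lines[j].startswith("## "):
--                 j += 1
--             segs.append((head.strip("# ").strip(), lines[i:j]))
--             i = j
--     return segs
--
--
-- def parse_markdown(md_content):
--     versions = OrderedDict()
--     for name, body in _segments(md_content.split("\n")):
--         if len(versions) >= 3:
--             break
--         versions[name] = "".join("\n\n" + l.strip() for l in body)
--     return versions
-- ===== Notes on version B (the rewrite author's own statement) =====
-- stated objective: alternative
-- what changed: A's single stateful line loop (current-section pointer, per-line dict string +=) is replaced by a two-phase decomposition: first carve the split lines into (name, body-lines) segments at the section headers, then fold the segments into the dict, joining each body in one pass.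
-- intended difference: On inputs where, among the first three sections, the last header line whose stripped name is empty is followed by body lines, A's truthiness test on the current section name treats the empty name as no-section and silently drops that body (the empty-named entry keeps an empty body), while B keeps the body text like any other section, which is the intended reading. — e.g. on parse_markdown("## \nx"): A returns [("", "")], B returns [("", "\n\nx")]
import Mathlib
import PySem

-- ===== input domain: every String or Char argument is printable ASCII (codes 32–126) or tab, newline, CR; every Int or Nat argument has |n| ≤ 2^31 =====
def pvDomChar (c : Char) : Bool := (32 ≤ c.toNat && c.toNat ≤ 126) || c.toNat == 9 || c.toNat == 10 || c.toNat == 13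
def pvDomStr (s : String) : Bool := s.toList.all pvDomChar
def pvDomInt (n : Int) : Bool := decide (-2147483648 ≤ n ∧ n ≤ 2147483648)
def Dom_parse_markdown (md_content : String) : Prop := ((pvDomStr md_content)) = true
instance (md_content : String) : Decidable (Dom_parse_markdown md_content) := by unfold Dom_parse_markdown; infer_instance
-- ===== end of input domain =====

-- B replaces A's single stateful line loop (current-section pointer, per-line string +=)
-- by a two-phase decomposition: carve the lines into (name, body-lines) segments, then
-- fold the segments into the dict, joining each body in one pass; objective: alternative.

set_option maxHeartbeats 1000000

-- ===== PORT A =====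
-- the two line operations A's code performs: line.startswith("## ") and line.strip("# ").strip()
def pmHdr (line : String) : Bool := PySem.Str.startswith line "## "

def pmNm (line : String) : String := PySem.Str.strip (PySem.Str.stripChars line "# ")

-- A's loop state: (versions, current_version); Python's 'break' returns versions as-is.
-- 'versions[current_version] += x' is modify with default "": when current_version is
-- truthy it is always a key of versions, so getD's default is never consulted.
def pmALoop : List String → PySem.Dict String String → Option String → PySem.Dict String String
  | [], versions, _ => versions
  | line :: rest, versions, current =>
    if pmHdr line then
      if versions.size < 3 then
        let c := pmNm line
        pmALoop rest (versions.insert c "") (some c)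
      else versions
    else
      match current with
      | some c =>
        if c = "" then pmALoop rest versions current
        else pmALoop rest (versions.modify c "" (fun v => v ++ ("\n\n" ++ PySem.Str.strip line))) current
      | none => pmALoop rest versions current

def parse_markdown (md_content : String) : List (String × String) :=
  -- md_content.split("\n"): split? is some because the separator "\n" is nonempty
  (pmALoop ((PySem.Str.split? md_content "\n").getD []) PySem.Dict.empty none).items

-- ===== PORT B =====
-- phase 1 of Source B (_segments): carve the lines into (name, body-lines) groups at section
-- headers; text before the first header is dropped. Structural with fuel ≥ lines.length
-- (the while loop's index advance), so the kernel reduces it.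
def pmSegmentsF : Nat → List String → List (String × List String)
  | 0, _ => []
  | _ + 1, [] => []
  | n + 1, head :: rest =>
    if pmHdr head then
      (pmNm head, rest.takeWhile (fun l => !pmHdr l)) ::
        pmSegmentsF n (rest.dropWhile (fun l => !pmHdr l))
    else pmSegmentsF n rest

def pmSegments (lines : List String) : List (String × List String) :=
  pmSegmentsF lines.length lines

-- phase 2 of Source B: fold the segments into the dict, stopping once 3 names exist
def pmBuild : List (String × List String) → PySem.Dict String String → PySem.Dict String String
  | [], versions => versions
  | (name, body) :: rest, versions =>
    if 3 ≤ versions.size then versions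
    else pmBuild rest (versions.insert name
        (PySem.Str.join "" (body.map (fun l => "\n\n" ++ PySem.Str.strip l))))

def parse_markdown_alt (md_content : String) : List (String × String) :=
  (pmBuild (pmSegments ((PySem.Str.split? md_content "\n").getD [])) PySem.Dict.empty).items

-- ===== PRECONDITION & SPEC =====
-- On inputs where, among the first three sections, the last header line whose stripped name
-- is empty is followed by body lines, A's truthiness test on the current section name treats
-- the empty name as no-section and silently drops that body (the empty-named entry keeps an
-- empty body), while B keeps the body text like any other section, which is the intended
-- reading. D_ inspects the input lines only: it pairs each line with its successor, keeps
-- the header lines reached while fewer than 3 distinct names exist, and asks whether the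
-- last empty-named one among them is followed by a non-header line.
def D_parse_markdown (md_content : String) : Prop :=
  (let ls := (PySem.Str.split? md_content "\n").getD []
   (ls.zip (ls.tail ++ ["## "])).foldl
      (fun st p =>
        if !pmHdr p.1 ∨ 3 ≤ st.1.length then st
        else (PySem.Set.add st.1 (pmNm p.1), if pmNm p.1 = "" then !pmHdr p.2 else st.2))
      ([], false)).2 = true
instance (md_content : String) : Decidable (D_parse_markdown md_content) := by
  unfold D_parse_markdown; infer_instance

def Spec_parse_markdown (md_content : String) (out : List (String × String)) : Prop :=
  ¬ D_parse_markdown md_content → out = parse_markdown_alt md_content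
instance (md_content : String) (out : List (String × String)) : Decidable (Spec_parse_markdown md_content out) := by unfold Spec_parse_markdown; infer_instance

def pvDiffWitness_parse_markdown : String := "## \nx"
def pvDiffWitnessOut_parse_markdown : (List (String × String)) × (List (String × String)) :=
  ([("", "")], [("", "\n\nx")])

-- ===== CLAIM (what is proved, stated in full; the proofs are below) =====
def Claim_unchanged_parse_markdown : Prop := ∀ (md_content : String), Dom_parse_markdown md_content → Spec_parse_markdown md_content (parse_markdown md_content)
def Claim_changed_parse_markdown : Prop := Dom_parse_markdown (pvDiffWitness_parse_markdown) ∧ D_parse_markdown (pvDiffWitness_parse_markdown) ∧ parse_markdown (pvDiffWitness_parse_markdown) = pvDiffWitnessOut_parse_markdown.1 ∧ parse_markdown_alt (pvDiffWitness_parse_markdown) = pvDiffWitnessOut_parse_markdown.2 ∧ pvDiffWitnessOut_parse_markdown.1 ≠ pvDiffWitnessOut_parse_markdown.2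
def Claim_exact_parse_markdown : Prop := ∀ (md_content : String), Dom_parse_markdown md_content → D_parse_markdown md_content → parse_markdown md_content ≠ parse_markdown_alt md_content

-- ===== LEMMAS AND PROOFS =====

-- proof-side recursive reformulation of D_'s fold, aligned with A's loop: flag is OVERWRITTEN
-- at each processed empty-named header by "is the next line a non-header"
def pmNextNonheader : List String → Bool
  | [] => false
  | l :: _ => !PySem.Str.startswith l "## "

def pmDScanX : List String → List String → Bool → Bool
  | [], _, flag => flag
  | line :: rest, names, flag =>
    if PySem.Str.startswith line "## " then
      if names.length < 3 then
        let c := PySem.Str.strip (PySem.Str.stripChars line "# ")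
        let names' := if c ∈ names then names else names ++ [c]
        if c = "" then pmDScanX rest names' (pmNextNonheader rest)
        else pmDScanX rest names' flag
      else flag
    else pmDScanX rest names flag

lemma pm_headD_nonheader (rest : List String) :
    (!pmHdr (rest.headD "## ")) = pmNextNonheader rest := by
  cases rest with
  | nil => decide
  | cons r t => simp [pmHdr, pmNextNonheader]

lemma pm_fold_stuck :
    ∀ (l : List (String × String)) (st : List String × Bool), 3 ≤ st.1.length →
      l.foldl (fun st p =>
        if !pmHdr p.1 ∨ 3 ≤ st.1.length then st
        else (PySem.Set.add st.1 (pmNm p.1), if pmNm p.1 = "" then !pmHdr p.2 else st.2)) st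
        = st := by
  intro l
  induction l with
  | nil => intro st _; rfl
  | cons p t ih =>
    intro st h
    simp only [List.foldl_cons, if_pos (Or.inr h)]
    exact ih st h

lemma pm_scanX_eq_fold :
    ∀ (lines names : List String) (flag : Bool),
      ((lines.zip (lines.tail ++ ["## "])).foldl
        (fun st p =>
          if !pmHdr p.1 ∨ 3 ≤ st.1.length then st
          else (PySem.Set.add st.1 (pmNm p.1), if pmNm p.1 = "" then !pmHdr p.2 else st.2))
        (names, flag)).2 = pmDScanX lines names flag := by
  intro lines
  induction lines with
  | nil => intro names flag; simp [pmDScanX]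
  | cons line rest ih =>
    intro names flag
    have hzip : (line :: rest).zip ((line :: rest).tail ++ ["## "])
        = (line, rest.headD "## ") :: rest.zip (rest.tail ++ ["## "]) := by
      cases rest <;> simp
    rw [hzip]
    simp only [List.foldl_cons]
    by_cases hh : pmHdr line = true
    · have hhC : PySem.Chars.startswith line.toList ['#', '#', ' '] = true := by
        simpa [pmHdr] using hh
      by_cases hlt : names.length < 3
      · have hcond : ¬ ((!pmHdr line) = true ∨ 3 ≤ ((names, flag) : List String × Bool).1.length) := by
          rintro (h | h)
          · rw [hh] at h; simp at h
          · simp at h; omega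
        rw [if_neg hcond]
        by_cases hc : pmNm line = ""
        · rw [if_pos hc, pm_headD_nonheader, ih]
          have hcS : PySem.Str.strip (PySem.Str.stripChars line "# ") = "" := hc
          simp [pmDScanX, pmNm, hhC, hlt, hcS, PySem.Set.add]
        · rw [if_neg hc, ih]
          have hcS : ¬ PySem.Str.strip (PySem.Str.stripChars line "# ") = "" := hc
          simp [pmDScanX, pmNm, hhC, hlt, hcS, PySem.Set.add]
      · have h3 : 3 ≤ ((names, flag) : List String × Bool).1.length := by simpa using hlt
        rw [if_pos (Or.inr h3), pm_fold_stuck _ _ h3]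
        simp [pmDScanX, hhC, hlt]
    · have hh' : pmHdr line = false := Bool.eq_false_iff.mpr hh
      have hhC : PySem.Chars.startswith line.toList ['#', '#', ' '] = false := by
        simpa [pmHdr] using hh'
      rw [if_pos (Or.inl (by rw [hh']; rfl)), ih]
      simp [pmDScanX, hhC]

lemma pm_join_nil : PySem.Str.join "" ([] : List String) = "" := by
  simp [PySem.Str.join, PySem.Chars.join, List.intercalate]

lemma pm_join_cons (x : String) (xs : List String) :
    PySem.Str.join "" (x :: xs) = x ++ PySem.Str.join "" xs := by
  cases xs with
  | nil =>
    simp [PySem.Str.join, PySem.Chars.join, List.intercalate, String.ofList_toList,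
      String.append_empty]
  | cons y t =>
    simp [PySem.Str.join, PySem.Chars.join, List.intercalate,
      String.ofList_append, String.ofList_toList]

lemma pm_join_body_ne (l : String) (t : List String) :
    PySem.Str.join "" ((l :: t).map (fun x => "\n\n" ++ PySem.Str.strip x)) ≠ "" := by
  rw [List.map_cons, pm_join_cons]
  intro h
  have := congrArg String.toList h
  simp [String.toList_append] at this

lemma pm_modify_insert (d : PySem.Dict String String) (c s : String) (f : String → String) :
    (d.insert c s).modify c "" f = d.insert c (f s) := by
  simp [PySem.Dict.modify, PySem.Dict.getD_insert_self, PySem.Dict.insert_insert_self]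

lemma pm_absorb :
    ∀ (body : List String), (∀ l ∈ body, pmHdr l = false) →
      ∀ (rest : List String) (d : PySem.Dict String String) (c s : String), c ≠ "" →
      pmALoop (body ++ rest) (d.insert c s) (some c)
        = pmALoop rest
            (d.insert c (s ++ PySem.Str.join "" (body.map (fun l => "\n\n" ++ PySem.Str.strip l))))
            (some c) := by
  intro body
  induction body with
  | nil => intro _ rest d c s _; simp [pm_join_nil, String.append_empty]
  | cons l t ih =>
    intro hb rest d c s hc
    have hl : pmHdr l = false := hb l (by simp)
    have hstep : pmALoop ((l :: t) ++ rest) (d.insert c s) (some c)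
        = pmALoop (t ++ rest) ((d.insert c s).modify c ""
            (fun v => v ++ ("\n\n" ++ PySem.Str.strip l))) (some c) := by
      simp [pmALoop, hl, hc]
    rw [hstep, pm_modify_insert,
      ih (fun x hx => hb x (by simp [hx])) rest d c (s ++ ("\n\n" ++ PySem.Str.strip l)) hc]
    rw [List.map_cons, pm_join_cons]
    simp [String.append_assoc]

lemma pm_skipA :
    ∀ (body : List String), (∀ l ∈ body, pmHdr l = false) →
      ∀ (rest : List String) (d : PySem.Dict String String),
      pmALoop (body ++ rest) d (some "") = pmALoop rest d (some "") := by
  intro body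
  induction body with
  | nil => intro _ rest d; simp
  | cons l t ih =>
    intro hb rest d
    have hl : pmHdr l = false := hb l (by simp)
    have hstep : pmALoop ((l :: t) ++ rest) d (some "")
        = pmALoop (t ++ rest) d (some "") := by
      simp [pmALoop, hl]
    rw [hstep, ih (fun x hx => hb x (by simp [hx])) rest d]

lemma pm_scanX_skip :
    ∀ (body : List String), (∀ l ∈ body, pmHdr l = false) →
      ∀ (rest names : List String) (a : Bool),
      pmDScanX (body ++ rest) names a = pmDScanX rest names a := by
  intro body
  induction body with
  | nil => intro _ rest names a; simp
  | cons l t ih =>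
    intro hb rest names a
    have hl : PySem.Str.startswith l "## " = false := hb l (by simp)
    simp only [List.cons_append, pmDScanX, hl, Bool.false_eq_true, if_false]
    exact ih (fun x hx => hb x (by simp [hx])) rest names a

lemma pm_header_irrel (line : String) (rest : List String) (d : PySem.Dict String String)
    (cur : Option String) (h : pmHdr line = true) :
    pmALoop (line :: rest) d cur = pmALoop (line :: rest) d none := by
  cases cur <;> simp [pmALoop, h]

lemma pm_dropWhile_head {α : Type} (p : α → Bool) :
    ∀ (l : List α) (x : α) (t : List α), l.dropWhile p = x :: t → p x = false := by
  intro l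
  induction l with
  | nil => intro x t h; simp [List.dropWhile] at h
  | cons a l ih =>
    intro x t h
    rw [List.dropWhile_cons] at h
    by_cases hp : p a = true
    · rw [if_pos hp] at h; exact ih x t h
    · rw [if_neg hp] at h
      cases h
      simpa using hp

lemma pm_keys_length (d : PySem.Dict String String) : d.keys.length = d.size := by
  simp [PySem.Dict.keys, PySem.Dict.size]

-- the relation maintained between A's dict and B's dict: equal except possibly the value
-- stored at key "", where A always holds "" and B holds some s; flag says s is nonempty
def pmRel (dA dB : PySem.Dict String String) (flag : Bool) : Prop :=
  dA.keys.Nodup ∧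
  ((dB = dA ∧ flag = false ∧ dA.get? "" = none) ∨
   (∃ s, dA.get? "" = some "" ∧ dB = dA.insert "" s ∧ (flag = true ↔ s ≠ "")))

lemma pm_rel_keys {dA dB : PySem.Dict String String} {flag : Bool} (h : pmRel dA dB flag) :
    dB.keys = dA.keys := by
  rcases h.2 with ⟨rfl, _, _⟩ | ⟨s, hg, rfl, _⟩
  · rfl
  · apply PySem.Dict.keys_insert_of_contains
    rw [PySem.Dict.contains_eq_isSome_get?, hg]
    rfl

lemma pm_insert_comm (d : PySem.Dict String String) (h : d.contains "" = true)
    (c : String) (hc : c ≠ "") (s j : String) :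
    (d.insert "" s).insert c j = (d.insert c j).insert "" s := by
  have hcb : (c == ("" : String)) = false := by simpa using hc
  have h1 : (d.insert "" s).contains c = d.contains c := by
    rw [PySem.Dict.contains_insert, hcb, Bool.false_or]
  have h2 : (d.insert c j).contains "" = true := by
    rw [PySem.Dict.contains_insert, h, Bool.or_true]
  apply PySem.Dict.ext
  by_cases hdc : d.contains c = true
  · rw [PySem.Dict.items_insert_of_contains _ _ (h1.trans hdc),
      PySem.Dict.items_insert_of_contains _ _ h,
      PySem.Dict.items_insert_of_contains _ _ h2,
      PySem.Dict.items_insert_of_contains _ _ hdc,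
      List.map_map, List.map_map]
    apply List.map_congr_left
    intro p _
    simp only [Function.comp_apply]
    by_cases hpe : p.1 = ""
    · simp [hpe, hc, hcb]
    · by_cases hpc : p.1 = c
      · simp [hpc, hcb, Ne.symm hc]
      · simp [hpe, hpc]
  · have hdc' : d.contains c = false := by simpa using hdc
    rw [PySem.Dict.items_insert_of_not_contains _ _ (h1.trans hdc'),
      PySem.Dict.items_insert_of_contains _ _ h,
      PySem.Dict.items_insert_of_contains _ _ h2,
      PySem.Dict.items_insert_of_not_contains _ _ hdc',
      List.map_append]
    simp [hcb]
    exact fun h => absurd h hc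

lemma pm_rel_insert {dA dB : PySem.Dict String String} {flag : Bool}
    (hrel : pmRel dA dB flag) (c j : String) (hc : c ≠ "") :
    pmRel (dA.insert c j) (dB.insert c j) flag := by
  refine ⟨PySem.Dict.nodup_keys_insert _ _ _ hrel.1, ?_⟩
  rcases hrel.2 with ⟨rfl, hf, hg⟩ | ⟨s, hg, rfl, hiff⟩
  · exact Or.inl ⟨rfl, hf, by rw [PySem.Dict.get?_insert_of_ne _ _ (Ne.symm hc)]; exact hg⟩
  · refine Or.inr ⟨s, ?_, ?_, hiff⟩
    · rw [PySem.Dict.get?_insert_of_ne _ _ (Ne.symm hc)]; exact hg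
    · rw [pm_insert_comm dA (by rw [PySem.Dict.contains_eq_isSome_get?, hg]; rfl) c hc s j]

lemma pm_rel_insert_empty {dA dB : PySem.Dict String String} {flag : Bool}
    (hrel : pmRel dA dB flag) (j : String) (b : Bool) (hb : b = true ↔ j ≠ "") :
    pmRel (dA.insert "" "") (dB.insert "" j) b := by
  refine ⟨PySem.Dict.nodup_keys_insert _ _ _ hrel.1, ?_⟩
  refine Or.inr ⟨j, PySem.Dict.get?_insert_self _ _ _, ?_, hb⟩
  rcases hrel.2 with ⟨rfl, _, _⟩ | ⟨s, _, rfl, _⟩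
  · rw [PySem.Dict.insert_insert_self]
  · rw [PySem.Dict.insert_insert_self, PySem.Dict.insert_insert_self]

lemma pm_insert_same_items (d : PySem.Dict String String) (hn : d.keys.Nodup)
    (h : d.get? "" = some "") : (d.insert "" "").items = d.items := by
  have hc : d.contains "" = true := by rw [PySem.Dict.contains_eq_isSome_get?, h]; rfl
  rw [PySem.Dict.items_insert_of_contains _ _ hc]
  have : ∀ p ∈ d.items, (if p.1 == "" then (("" : String), ("" : String)) else p) = p := by
    intro p hp
    by_cases hpe : p.1 = ""
    · have : d.get? p.1 = some p.2 := PySem.Dict.get?_of_mem_items d (by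
        simpa using hp) hn
      rw [hpe] at this
      rw [h] at this
      cases p with
      | mk k v =>
        simp only at hpe
        cases Option.some.inj this
        simp [hpe]
    · simp [hpe]
  calc (d.items.map (fun p => if p.1 == "" then (("" : String), ("" : String)) else p))
      = d.items.map id := List.map_congr_left this
    _ = d.items := List.map_id _

lemma pm_mainX :
    ∀ (n : Nat) (lines : List String), lines.length ≤ n →
      ∀ (dA dB : PySem.Dict String String) (cur : Option String) (flag : Bool),
      (cur = none ∨ cur = some "") → pmRel dA dB flag →
      pmRel (pmALoop lines dA cur) (pmBuild (pmSegmentsF n lines) dB)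
        (pmDScanX lines dA.keys flag) := by
  intro n
  induction n with
  | zero =>
    intro lines hlen dA dB cur flag hcur hrel
    have hnil : lines = [] := List.eq_nil_of_length_eq_zero (Nat.le_zero.mp hlen)
    subst hnil
    cases cur <;> simpa [pmALoop, pmSegmentsF, pmBuild, pmDScanX] using hrel
  | succ n ih =>
    intro lines hlen dA dB cur flag hcur hrel
    cases lines with
    | nil => cases cur <;> simpa [pmALoop, pmSegmentsF, pmBuild, pmDScanX] using hrel
    | cons line rest =>
      have hlen' : rest.length ≤ n := by simp [List.length_cons] at hlen; omega
      have hkeysBA : dB.keys = dA.keys := pm_rel_keys hrel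
      have hsize : dB.size = dA.size := by
        rw [← pm_keys_length, ← pm_keys_length, hkeysBA]
      by_cases hh : pmHdr line = true
      · have hh' : PySem.Chars.startswith line.toList ['#', '#', ' '] = true := by
          simpa [pmHdr] using hh
        have hhS : PySem.Str.startswith line "## " = true := hh
        have hkeys : ∀ (v : String), ((dA.insert (pmNm line) v).keys)
            = (if pmNm line ∈ dA.keys then dA.keys else dA.keys ++ [pmNm line]) := by
          intro v
          by_cases hm : pmNm line ∈ dA.keys
          · rw [if_pos hm, PySem.Dict.keys_insert_of_contains]
            rw [PySem.Dict.contains_eq_decide_mem_keys]; simpa using hm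
          · rw [if_neg hm, PySem.Dict.keys_insert_of_not_contains]
            rw [PySem.Dict.contains_eq_decide_mem_keys]; simpa using hm
        by_cases hs : dA.size < 3
        · have hs' : ¬ 3 ≤ dB.size := by omega
          have hklt : dA.keys.length < 3 := by rw [pm_keys_length]; exact hs
          have hA : pmALoop (line :: rest) dA cur
              = pmALoop rest (dA.insert (pmNm line) "") (some (pmNm line)) := by
            rcases hcur with rfl | rfl <;> simp [pmALoop, hh, hs]
          have hbody : ∀ l ∈ rest.takeWhile (fun l => !pmHdr l), pmHdr l = false := by
            intro l hl
            simpa using List.mem_takeWhile_imp hl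
          by_cases hc : pmNm line = ""
          · -- empty name: A skips the body, B attaches it to key ""
            have hcS : PySem.Str.strip (PySem.Str.stripChars line "# ") = "" := hc
            have hB : pmBuild (pmSegmentsF (n + 1) (line :: rest)) dB
                = pmBuild (pmSegmentsF n (rest.dropWhile (fun l => !pmHdr l)))
                    (dB.insert ""
                      (PySem.Str.join "" ((rest.takeWhile (fun l => !pmHdr l)).map
                        (fun l => "\n\n" ++ PySem.Str.strip l)))) := by
              rw [pmSegmentsF, if_pos hh, pmBuild, if_neg hs', hc]
            have hkeys0 := hkeys ""
            rw [hc] at hkeys0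
            have hskip := pm_scanX_skip _ hbody (rest.dropWhile (fun l => !pmHdr l))
              ((dA.insert "" "").keys) (pmNextNonheader rest)
            rw [List.takeWhile_append_dropWhile] at hskip
            have hscan : pmDScanX (line :: rest) dA.keys flag
                = pmDScanX (rest.dropWhile (fun l => !pmHdr l))
                    ((dA.insert "" "").keys) (pmNextNonheader rest) := by
              rw [← hskip, hkeys0]
              simp [pmDScanX, hh', hklt, hcS]
            have hArw : pmALoop (line :: rest) dA cur
                = pmALoop (rest.dropWhile (fun l => !pmHdr l)) (dA.insert "" "") (some "") := by
              rw [hA, hc]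
              conv_lhs => rw [← List.takeWhile_append_dropWhile (p := fun l => !pmHdr l) (l := rest)]
              exact pm_skipA _ hbody _ _
            have hbflag : pmNextNonheader rest = true ↔
                (PySem.Str.join "" ((rest.takeWhile (fun l => !pmHdr l)).map
                  (fun l => "\n\n" ++ PySem.Str.strip l))) ≠ "" := by
              cases rest with
              | nil => simp [pmNextNonheader, pm_join_nil]
              | cons r rt =>
                by_cases hr : pmHdr r = true
                · have htk : List.takeWhile (fun l => !pmHdr l) (r :: rt) = [] := by
                    simp [List.takeWhile_cons, hr]
                  have hrC : PySem.Chars.startswith r.toList ['#', '#', ' '] = true := by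
                    simpa [pmHdr] using hr
                  have hl : pmNextNonheader (r :: rt) = false := by
                    simp [pmNextNonheader, hrC]
                  exact iff_of_false (by simp [hl])
                    (by rw [htk, List.map_nil, pm_join_nil]; simp)
                · have hrS : pmHdr r = false := Bool.eq_false_iff.mpr hr
                  have htk : List.takeWhile (fun l => !pmHdr l) (r :: rt)
                      = r :: List.takeWhile (fun l => !pmHdr l) rt := by
                    simp [List.takeWhile_cons, hrS]
                  have hrC : PySem.Chars.startswith r.toList ['#', '#', ' '] = false := by
                    simpa [pmHdr] using hrS
                  have hl : pmNextNonheader (r :: rt) = true := by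
                    simp [pmNextNonheader, hrC]
                  exact iff_of_true hl (by rw [htk]; exact pm_join_body_ne _ _)
            have hrel' := pm_rel_insert_empty hrel _ _ hbflag
            rw [hArw, hB, hscan]
            have hdroplen : (rest.dropWhile (fun l => !pmHdr l)).length ≤ n := by
              have := List.length_dropWhile_le (p := fun l => !pmHdr l) (l := rest)
              omega
            exact ih _ hdroplen _ _ _ _ (Or.inr rfl) hrel'
          · -- nonempty name: absorb the body into the inserted value, then jump to next header
            have hcS : ¬ PySem.Str.strip (PySem.Str.stripChars line "# ") = "" := hc
            have hB : pmBuild (pmSegmentsF (n + 1) (line :: rest)) dB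
                = pmBuild (pmSegmentsF n (rest.dropWhile (fun l => !pmHdr l)))
                    (dB.insert (pmNm line)
                      (PySem.Str.join "" ((rest.takeWhile (fun l => !pmHdr l)).map
                        (fun l => "\n\n" ++ PySem.Str.strip l)))) := by
              rw [pmSegmentsF, if_pos hh, pmBuild, if_neg hs']
            have hskip := pm_scanX_skip _ hbody (rest.dropWhile (fun l => !pmHdr l))
              ((dA.insert (pmNm line)
                (PySem.Str.join "" ((rest.takeWhile (fun l => !pmHdr l)).map
                  (fun l => "\n\n" ++ PySem.Str.strip l)))).keys) flag
            rw [List.takeWhile_append_dropWhile] at hskip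
            have hscan : pmDScanX (line :: rest) dA.keys flag
                = pmDScanX (rest.dropWhile (fun l => !pmHdr l))
                    ((dA.insert (pmNm line)
                      (PySem.Str.join "" ((rest.takeWhile (fun l => !pmHdr l)).map
                        (fun l => "\n\n" ++ PySem.Str.strip l)))).keys) flag := by
              rw [← hskip, hkeys]
              simp [pmDScanX, hh', hklt, hcS, pmNm]
            have hrel' := pm_rel_insert hrel (pmNm line)
              (PySem.Str.join "" ((rest.takeWhile (fun l => !pmHdr l)).map
                (fun l => "\n\n" ++ PySem.Str.strip l))) hc
            have habs := pm_absorb _ hbody (rest.dropWhile (fun l => !pmHdr l)) dA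
              (pmNm line) "" hc
            rw [List.takeWhile_append_dropWhile, String.empty_append] at habs
            rw [hA, habs, hB, hscan]
            cases hdrop : rest.dropWhile (fun l => !pmHdr l) with
            | nil =>
              cases n <;> simpa [pmALoop, pmSegmentsF, pmBuild, pmDScanX] using hrel'
            | cons h2 t2 =>
              have hhd : pmHdr h2 = true := by
                have := pm_dropWhile_head (fun l => !pmHdr l) rest h2 t2 hdrop
                simpa using this
              rw [pm_header_irrel _ _ _ _ hhd]
              have hlen2 : (h2 :: t2).length ≤ n := by
                have := List.length_dropWhile_le (p := fun l => !pmHdr l) (l := rest)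
                rw [hdrop] at this
                omega
              exact ih (h2 :: t2) hlen2 _ _ none flag (Or.inl rfl) hrel'
        · -- already 3 names: A breaks, B's gate closes, the scan returns the flag
          have hs' : 3 ≤ dB.size := by omega
          have hklt : ¬ dA.keys.length < 3 := by rw [pm_keys_length]; omega
          have hA : pmALoop (line :: rest) dA cur = dA := by
            rcases hcur with rfl | rfl <;> simp [pmALoop, hh, hs]
          have hB : pmBuild (pmSegmentsF (n + 1) (line :: rest)) dB = dB := by
            rw [pmSegmentsF, if_pos hh, pmBuild, if_pos hs']
          have hscan : pmDScanX (line :: rest) dA.keys flag = flag := by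
            simp [pmDScanX, hh', hklt]
          rw [hA, hB, hscan]
          exact hrel
      · have hh2 : PySem.Chars.startswith line.toList ['#', '#', ' '] = false := by
          simpa [pmHdr] using hh
        have hhS : PySem.Str.startswith line "## " = false := by
          simpa [pmHdr] using hh
        have hhF : pmHdr line = false := Bool.eq_false_iff.mpr hh
        have hA : pmALoop (line :: rest) dA cur = pmALoop rest dA cur := by
          rcases hcur with rfl | rfl <;> simp [pmALoop, hhF]
        have hB : pmSegmentsF (n + 1) (line :: rest) = pmSegmentsF n rest := by
          rw [pmSegmentsF, if_neg hh]
        have hscan : pmDScanX (line :: rest) dA.keys flag = pmDScanX rest dA.keys flag := by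
          simp [pmDScanX, hh2]
        rw [hA, hB, hscan]
        exact ih rest hlen' dA dB cur flag hcur hrel

lemma pm_rel_empty : pmRel PySem.Dict.empty PySem.Dict.empty false :=
  ⟨by simpa using PySem.Dict.nodup_keys_empty (κ := String) (ν := String),
   Or.inl ⟨rfl, rfl, PySem.Dict.get?_empty _⟩⟩

-- the top-level relation, with the final flag rewritten to D_'s fold value
lemma pm_top (md : String) :
    pmRel (pmALoop ((PySem.Str.split? md "\n").getD []) PySem.Dict.empty none)
      (pmBuild (pmSegments ((PySem.Str.split? md "\n").getD [])) PySem.Dict.empty)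
      (pmDScanX ((PySem.Str.split? md "\n").getD []) [] false) := by
  unfold pmSegments
  have h := pm_mainX ((PySem.Str.split? md "\n").getD []).length
    ((PySem.Str.split? md "\n").getD []) le_rfl PySem.Dict.empty PySem.Dict.empty none false
    (Or.inl rfl) pm_rel_empty
  rwa [PySem.Dict.keys_empty] at h

lemma pm_D_iff (md : String) :
    D_parse_markdown md ↔ pmDScanX ((PySem.Str.split? md "\n").getD []) [] false = true := by
  unfold D_parse_markdown
  rw [pm_scanX_eq_fold]

-- ===== VERDICT (by name: the statement is the Claim_ definition above) =====
theorem parse_markdown_spec : Claim_unchanged_parse_markdown := by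
  intro md _ hnD
  have hf : pmDScanX ((PySem.Str.split? md "\n").getD []) [] false = false := by
    cases h : pmDScanX ((PySem.Str.split? md "\n").getD []) [] false
    · rfl
    · exact absurd ((pm_D_iff md).mpr h) hnD
  have hrel := pm_top md
  rw [hf] at hrel
  unfold parse_markdown parse_markdown_alt
  rcases hrel.2 with ⟨heq, _, _⟩ | ⟨s, hga, hbe, hiff⟩
  · rw [heq]
  · have hs : s = "" := by
      by_contra hs
      exact absurd (hiff.mpr hs) (by simp)
    rw [hbe, hs, pm_insert_same_items _ hrel.1 hga]

theorem parse_markdown_changed : Claim_changed_parse_markdown := by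
  unfold Claim_changed_parse_markdown; decide

theorem parse_markdown_tight : Claim_exact_parse_markdown := by
  intro md _ hD heq
  have ht : pmDScanX ((PySem.Str.split? md "\n").getD []) [] false = true := (pm_D_iff md).mp hD
  have hrel := pm_top md
  rw [ht] at hrel
  unfold parse_markdown parse_markdown_alt at heq
  rcases hrel.2 with ⟨_, hfl, _⟩ | ⟨s, hga, hbe, hiff⟩
  · exact absurd hfl (by simp)
  · have hs : s ≠ "" := hiff.mp rfl
    have hde : pmALoop ((PySem.Str.split? md "\n").getD []) PySem.Dict.empty none
        = pmBuild (pmSegments ((PySem.Str.split? md "\n").getD [])) PySem.Dict.empty :=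
      PySem.Dict.ext heq
    have := hde.trans hbe
    have hgg := congrArg (fun d => PySem.Dict.get? d "") this
    simp only at hgg
    rw [hga, PySem.Dict.get?_insert_self] at hgg
    exact hs (Option.some.inj hgg).symm
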